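-- pv_equiv track=rewrite | github.com/Kelly-001-maker/AES-Encryption-Algorithm | mainpythoncode.py | remove_repeating_elements
-- ===== SOURCE A (Python) =====
-- def remove_repeating_elements(list):
--     myloopcond = 0;
--     change = 0;
--     while myloopcond < len(list):
--         list_traverse = myloopcond + 1;
--         while list_traverse < len(list):
--             element_check = list[myloopcond]
--             if element_check == list[list_traverse]:
--                 del list[list_traverse]
--                 del list[myloopcond]
--                 list_traverse = myloopcond + 1;
--             else:
--                 list_traverse = list_traverse + 1;
--
--         myloopcond = myloopcond + 1;
--
--
--     return list;
-- ===== SOURCE B (Python) =====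
-- def remove_repeating_elements(list):
--     result = []
--     for x in list:
--         i = next((i for i, e in enumerate(result) if e == x), -1)
--         if i >= 0:
--             del result[i]
--         else:
--             result.append(x)
--     list[:] = result
--     return list
-- ===== Notes on version B (the rewrite author's own statement) =====
-- stated objective: simpler
-- what changed: Replaces A's nested index loops with restarting in-place pair deletion by a single forward pass that toggles each element in/out of an output list, then assigns it back into the argument.
import Mathlib
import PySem

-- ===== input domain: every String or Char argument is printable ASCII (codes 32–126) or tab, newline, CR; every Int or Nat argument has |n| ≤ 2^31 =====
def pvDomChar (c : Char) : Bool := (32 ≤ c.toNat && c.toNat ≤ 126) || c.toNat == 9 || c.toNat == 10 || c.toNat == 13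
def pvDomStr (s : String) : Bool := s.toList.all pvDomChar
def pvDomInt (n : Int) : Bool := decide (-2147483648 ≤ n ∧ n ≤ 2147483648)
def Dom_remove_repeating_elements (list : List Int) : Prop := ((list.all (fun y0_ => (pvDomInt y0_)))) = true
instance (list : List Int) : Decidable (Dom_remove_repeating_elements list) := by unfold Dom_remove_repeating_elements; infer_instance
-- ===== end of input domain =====

-- B replaces A's nested index loops (in-place restarting pair deletion) by a single forward
-- pass that toggles each element in/out of an output list: simpler, one decomposition.
-- Both Pythons mutate the argument list in place; the equivalence proved here is about the
-- return value (B performs the same final mutation via list[:] = result).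


-- ===== PORT A =====
-- inner `while list_traverse < len(list)` loop of A; i = myloopcond, j = list_traverse,
-- `del list[k]` = eraseIdx k; indices are in range on every reachable state, so getD is exact.
-- fuel is a totality guard only: (len+1)^2 always exceeds the loop's step count (proved below)
def pvInnerA : Nat → List Int → Nat → Nat → List Int
  | 0, l, _, _ => l
  | fuel + 1, l, i, j =>
    if j < l.length then
      let element_check := l.getD i 0
      if element_check = l.getD j 0 then
        pvInnerA fuel ((l.eraseIdx j).eraseIdx i) i (i + 1)
      else
        pvInnerA fuel l i (j + 1)
    else l

-- outer `while myloopcond < len(list)` loop of A; fuel len+1 always suffices (proved below)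
def pvOuterA : Nat → List Int → Nat → List Int
  | 0, l, _ => l
  | fuel + 1, l, i =>
    if i < l.length then
      pvOuterA fuel (pvInnerA ((l.length + 1) * (l.length + 1)) l i (i + 1)) (i + 1)
    else l

def remove_repeating_elements (list : List Int) : List Int := pvOuterA (list.length + 1) list 0

-- ===== PORT B =====
-- next((i for i, e in enumerate(result) if e == x), -1): index of first equal element
def pvFirstEq : List Int → Int → Option Nat
  | [], _ => none
  | e :: rest, x => if e = x then some 0 else (pvFirstEq rest x).map (· + 1)

-- one step of B's loop body: delete the found element, else append
def pvToggle (result : List Int) (x : Int) : List Int :=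
  match pvFirstEq result x with
  | some i => result.eraseIdx i
  | none => result ++ [x]

def remove_repeating_elements_alt (list : List Int) : List Int :=
  list.foldl pvToggle []

-- ===== PRECONDITION & SPEC =====
def Spec_remove_repeating_elements (list : List Int) (out : List Int) : Prop := out = remove_repeating_elements_alt list
instance (list : List Int) (out : List Int) : Decidable (Spec_remove_repeating_elements list out) := by unfold Spec_remove_repeating_elements; infer_instance

-- ===== CLAIM (what is proved, stated in full; the proofs are below) =====
def Claim_equal_remove_repeating_elements : Prop := ∀ (list : List Int), Dom_remove_repeating_elements list → Spec_remove_repeating_elements list (remove_repeating_elements list)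

-- ===== LEMMAS AND PROOFS =====

-- canonical recurrence both programs satisfy: drop the head together with its first later
-- duplicate if there is one, otherwise keep the head
theorem pvDecErase (x : Int) (t : List Int) (h : x ∈ t) :
    (t.erase x).length < (x :: t).length := by
  simp [h]

theorem pvDecTail (x : Int) (t : List Int) : t.length < (x :: t).length := by simp

def pvH : List Int → List Int
  | [] => []
  | x :: t => if x ∈ t then pvH (t.erase x) else x :: pvH t
termination_by l => l.length
decreasing_by
  · exact pvDecErase x t (by assumption)
  · exact pvDecTail x t

-- what A's inner loop leaves at the current position: strip head-with-duplicate pairs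
def pvFA : List Int → List Int
  | [] => []
  | x :: t => if x ∈ t then pvFA (t.erase x) else x :: t
termination_by l => l.length
decreasing_by
  · exact pvDecErase x t (by assumption)

theorem pvToggle_eq (r : List Int) (x : Int) :
    pvToggle r x = if x ∈ r then r.erase x else r ++ [x] := by
  induction r with
  | nil => simp [pvToggle, pvFirstEq]
  | cons e rest ih =>
    by_cases hex : e = x
    · subst hex
      simp [pvToggle, pvFirstEq]
    · have hx : (e == x) = false := by simp [hex]
      simp only [pvToggle, pvFirstEq, if_neg hex] at *
      cases hfe : pvFirstEq rest x with
      | none =>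
        simp [hfe] at ih ⊢
        have : x ∉ rest := by
          by_contra hmem
          simp [hmem] at ih
          have := congrArg List.length ih
          simp [hmem] at this
          omega
        simp [this, Ne.symm hex]
      | some i =>
        simp [hfe] at ih ⊢
        have : x ∈ rest := by
          by_contra hmem
          simp [hmem] at ih
          have := congrArg List.length ih
          simp [List.length_eraseIdx] at this
          split at this <;> omega
        simp [this, Ne.symm hex, List.erase_cons_tail, hx, ih]

theorem pvFoldl_toggle_cons (t : List Int) (x : Int) (hx : x ∉ t) :
    ∀ acc, List.foldl pvToggle (x :: acc) t = x :: List.foldl pvToggle acc t := by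
  induction t with
  | nil => intro acc; simp
  | cons z t' ih =>
    intro acc
    have hzx : z ≠ x := fun h => hx (h ▸ List.mem_cons_self ..)
    have hxt' : x ∉ t' := fun h => hx (List.mem_cons_of_mem _ h)
    have hstep : pvToggle (x :: acc) z = x :: pvToggle acc z := by
      rw [pvToggle_eq, pvToggle_eq]
      by_cases hz : z ∈ acc
      · simp [hz, hzx, List.erase_cons_tail, show (x == z) = false by simp [Ne.symm hzx]]
      · simp [hz, hzx]
    simp only [List.foldl_cons, hstep, ih hxt']

theorem pvF_cons_mem (x : Int) (t : List Int) (hx : x ∈ t) :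
    List.foldl pvToggle [] (x :: t) = List.foldl pvToggle [] (t.erase x) := by
  obtain ⟨u, v, hxu, ht, herase⟩ := List.exists_erase_eq hx
  subst ht
  rw [herase]
  have h1 : pvToggle [] x = [x] := by rw [pvToggle_eq]; simp
  have h2 : List.foldl pvToggle [x] u = x :: List.foldl pvToggle [] u :=
    pvFoldl_toggle_cons u x hxu []
  have h3 : pvToggle (x :: List.foldl pvToggle [] u) x = List.foldl pvToggle [] u := by
    rw [pvToggle_eq]; simp
  simp only [List.foldl_cons, h1, List.foldl_append, h2, h3]

theorem pvF_cons_notmem (x : Int) (t : List Int) (hx : x ∉ t) :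
    List.foldl pvToggle [] (x :: t) = x :: List.foldl pvToggle [] t := by
  have h1 : pvToggle [] x = [x] := by rw [pvToggle_eq]; simp
  simp only [List.foldl_cons, h1]
  exact pvFoldl_toggle_cons t x hx []

theorem pvAlt_eq_pvH (l : List Int) : remove_repeating_elements_alt l = pvH l := by
  induction l using pvH.induct with
  | case1 => simp [remove_repeating_elements_alt, pvH]
  | case2 x t hx ih =>
    unfold remove_repeating_elements_alt at *
    rw [pvF_cons_mem x t hx, ih, pvH, if_pos hx]
  | case3 x t hx ih =>
    unfold remove_repeating_elements_alt at *
    rw [pvF_cons_notmem x t hx, ih, pvH, if_neg hx]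

theorem pvH_fA (s : List Int) :
    pvH s = match pvFA s with | [] => [] | y :: u => y :: pvH u := by
  induction s using pvH.induct with
  | case1 => simp [pvH, pvFA]
  | case2 x t hx ih => rw [pvH, if_pos hx, ih, pvFA, if_pos hx]
  | case3 x t hx _ => rw [pvH, if_neg hx, pvFA, if_neg hx]

-- erase of the first occurrence is eraseIdx at its index
theorem pvErase_eq_eraseIdx (t : List Int) (x : Int) :
    ∀ m, (hm : m < t.length) → t[m] = x → (∀ k (hk : k < m), t[k]'(by omega) ≠ x) →
    t.erase x = t.eraseIdx m := by
  induction t with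
  | nil => intro m hm; simp at hm
  | cons e rest ih =>
    intro m hm hx hfirst
    cases m with
    | zero =>
      simp at hx; subst hx
      simp [List.erase_cons_head]
    | succ m' =>
      have he : e ≠ x := by
        have := hfirst 0 (Nat.succ_pos m')
        simpa using this
      rw [List.erase_cons_tail (by simp [he]), List.eraseIdx_cons_succ]
      congr 1
      exact ih m' (by simpa using hm) (by simpa using hx)
        (fun k hk => by
          have := hfirst (k + 1) (by omega)
          simpa using this)

-- the double deletion of A in terms of take/drop
theorem pvErase2 (l : List Int) (i j : Nat) (hij : i < j) (hj : j < l.length) :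
    (l.eraseIdx j).eraseIdx i = l.take i ++ (l.drop (i + 1)).eraseIdx (j - i - 1) := by
  have hlt : (List.take j l).length = j := by simp; omega
  calc (l.eraseIdx j).eraseIdx i
      = (List.take j l ++ List.drop (j + 1) l).eraseIdx i := by
        conv_lhs => rw [List.eraseIdx_eq_take_drop_succ l j]
    _ = (List.take j l).eraseIdx i ++ List.drop (j + 1) l :=
        List.eraseIdx_append_of_lt_length (by omega) _
    _ = (List.take i l ++ List.drop (i + 1) (List.take j l)) ++ List.drop (j + 1) l := by
        rw [List.eraseIdx_eq_take_drop_succ, List.take_take, min_eq_left (by omega)]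
    _ = List.take i l ++ (List.take (j - i - 1) (List.drop (i + 1) l) ++ List.drop (j + 1) l) := by
        rw [List.append_assoc, List.drop_take, Nat.sub_sub]
    _ = List.take i l ++ (List.drop (i + 1) l).eraseIdx (j - i - 1) := by
        rw [List.eraseIdx_eq_take_drop_succ, List.drop_drop]
        have he : i + 1 + (j - i - 1 + 1) = j + 1 := by omega
        rw [he]

theorem pvInnerA_length_le (fuel : Nat) : ∀ (l : List Int) (i j : Nat),
    (pvInnerA fuel l i j).length ≤ l.length := by
  induction fuel with
  | zero => intro l i j; simp [pvInnerA]
  | succ fuel ih =>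
    intro l i j
    rw [pvInnerA]
    by_cases h : j < l.length
    · rw [if_pos h]
      by_cases heq : l.getD i 0 = l.getD j 0
      · rw [if_pos heq]
        refine le_trans (ih _ _ _) ?_
        refine le_trans (List.length_eraseIdx_le _ _) (List.length_eraseIdx_le _ _)
      · rw [if_neg heq]
        exact ih _ _ _
    · rw [if_neg h]

-- the terminated inner loop leaves the list unchanged when no later duplicate exists
theorem pvNoDupResult (l : List Int) (i : Nat)
    (hfirst : ∀ k, i < k → (hk : k < l.length) → l[k] ≠ l.getD i 0) :
    l = l.take i ++ pvFA (l.drop i) := by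
  rcases Nat.lt_or_ge i l.length with hi | hi
  · have hdrop : l.drop i = l[i] :: l.drop (i + 1) := List.drop_eq_getElem_cons hi
    have hnot : l[i] ∉ l.drop (i + 1) := by
      rw [List.mem_iff_getElem]
      rintro ⟨m, hm, hgm⟩
      rw [List.getElem_drop] at hgm
      exact hfirst (i + 1 + m) (by omega) (by simp at hm; omega)
        (by rw [List.getD_eq_getElem l 0 hi]; exact hgm)
    rw [hdrop, pvFA, if_neg hnot, ← hdrop, List.take_append_drop]
  · rw [List.drop_eq_nil_of_le hi, List.take_of_length_le hi, pvFA, List.append_nil]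

theorem pvInnerA_spec (fuel : Nat) : ∀ (l : List Int) (i j : Nat),
    l.length * l.length + l.length < fuel + j →
    i < j → (∀ k, i < k → k < j → (hk : k < l.length) → l[k] ≠ l.getD i 0) →
    pvInnerA fuel l i j = l.take i ++ pvFA (l.drop i) := by
  induction fuel with
  | zero =>
    intro l i j hfuel hij hfirst
    -- fuel 0 forces j > len^2 + len ≥ len: the loop would not have run at all
    have hj : l.length ≤ j := by
      rcases Nat.lt_or_ge j l.length with hlt | hge
      · exact absurd hfuel (by have := Nat.le_mul_of_pos_left l.length (show 0 < l.length by omega); omega)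
      · exact hge
    rw [pvInnerA]
    exact pvNoDupResult l i (fun k hik hk => hfirst k hik (by omega) hk)
  | succ fuel ih =>
    intro l i j hfuel hij hfirst
    rw [pvInnerA]
    by_cases h : j < l.length
    · rw [if_pos h]
      by_cases heq : l.getD i 0 = l.getD j 0
      · rw [if_pos heq]
        have hi : i < l.length := by omega
        have hlen1 : (l.eraseIdx j).length = l.length - 1 := by
          simp [List.length_eraseIdx, h]
        have hlen2 : ((l.eraseIdx j).eraseIdx i).length = l.length - 2 := by
          rw [List.length_eraseIdx, hlen1, if_pos (by omega)]; omega
        -- arithmetic on the fuel bound, with len = k + 2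
        obtain ⟨k, hk2⟩ : ∃ k, l.length = k + 2 := ⟨l.length - 2, by omega⟩
        have hexp : (k + 2) * (k + 2) = k * k + 4 * k + 4 := by ring
        have hfuel' : ((l.eraseIdx j).eraseIdx i).length * ((l.eraseIdx j).eraseIdx i).length +
            ((l.eraseIdx j).eraseIdx i).length < fuel + (i + 1) := by
          rw [hlen2, hk2]
          rw [hk2, hexp] at hfuel
          simp only [Nat.add_sub_cancel]
          omega
        have hxi : l[i] = l.getD i 0 := (List.getD_eq_getElem l 0 hi).symm
        have hdrop : l.drop i = l.getD i 0 :: l.drop (i + 1) := by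
          rw [List.drop_eq_getElem_cons hi, hxi]
        have htlen : (l.drop (i + 1)).length = l.length - (i + 1) := by simp
        have hm : j - i - 1 < (l.drop (i + 1)).length := by omega
        have htm : (l.drop (i + 1))[j - i - 1]'hm = l.getD i 0 := by
          have h1 : (l.drop (i + 1))[j - i - 1]'hm = l[i + 1 + (j - i - 1)]'(by omega) :=
            List.getElem_drop
          have h2 : l[i + 1 + (j - i - 1)]'(by omega) = l[j]'h := by congr 1; omega
          rw [h1, h2, ← List.getD_eq_getElem l 0 h, ← heq]
        have htfirst : ∀ k (hk : k < j - i - 1), (l.drop (i + 1))[k]'(by omega) ≠ l.getD i 0 := by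
          intro k hk
          rw [List.getElem_drop]
          exact hfirst (i + 1 + k) (by omega) (by omega) (by omega)
        have hxt : l.getD i 0 ∈ l.drop (i + 1) := by
          rw [List.mem_iff_getElem]; exact ⟨j - i - 1, hm, htm⟩
        have herase : (l.drop (i + 1)).erase (l.getD i 0) = (l.drop (i + 1)).eraseIdx (j - i - 1) :=
          pvErase_eq_eraseIdx (l.drop (i + 1)) (l.getD i 0) (j - i - 1) hm htm htfirst
        have hl' : (l.eraseIdx j).eraseIdx i = l.take i ++ (l.drop (i + 1)).erase (l.getD i 0) := by
          rw [pvErase2 l i j hij h, herase]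
        have hlen_take : (l.take i).length = i := by simp; omega
        rw [ih _ i (i + 1) hfuel' (by omega)
          (by intro k hik hk1 hk; exact absurd hk1 (by omega)), hl']
        have htake' : (l.take i ++ (l.drop (i + 1)).erase (l.getD i 0)).take i = l.take i := by
          rw [List.take_append, hlen_take, List.take_take, min_self, Nat.sub_self, List.take_zero,
            List.append_nil]
        have hdrop' : (l.take i ++ (l.drop (i + 1)).erase (l.getD i 0)).drop i =
            (l.drop (i + 1)).erase (l.getD i 0) := by
          rw [List.drop_append, hlen_take, Nat.sub_self, List.drop_zero,
            List.drop_of_length_le (by omega), List.nil_append]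
        rw [htake', hdrop', hdrop, pvFA, if_pos hxt, herase]
      · rw [if_neg heq]
        apply ih _ i (j + 1) (by omega) (by omega)
        intro k hik hkj hk
        rcases Nat.lt_or_ge k j with hkj' | hkj'
        · exact hfirst k hik hkj' hk
        · have hkeq : k = j := by omega
          subst hkeq
          rw [List.getD_eq_getElem l 0 hk] at heq
          exact fun hc => heq hc.symm
    · rw [if_neg h]
      exact pvNoDupResult l i (fun k hik hk => hfirst k hik (by omega) hk)

theorem pvOuterA_spec (fuel : Nat) : ∀ (l : List Int) (i : Nat),
    l.length < fuel + i →
    pvOuterA fuel l i = l.take i ++ pvH (l.drop i) := by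
  induction fuel with
  | zero =>
    intro l i hfuel
    rw [pvOuterA, List.take_of_length_le (by omega), List.drop_eq_nil_of_le (by omega), pvH,
      List.append_nil]
  | succ fuel ih =>
    intro l i hfuel
    rw [pvOuterA]
    by_cases h : i < l.length
    · rw [if_pos h]
      have hexp : (l.length + 1) * (l.length + 1) = l.length * l.length + 2 * l.length + 1 := by
        ring
      have hinner : pvInnerA ((l.length + 1) * (l.length + 1)) l i (i + 1) =
          l.take i ++ pvFA (l.drop i) :=
        pvInnerA_spec _ l i (i + 1) (by omega) (by omega)
          (by intro k h1 h2; exact absurd h2 (by omega))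
      have hle := pvInnerA_length_le ((l.length + 1) * (l.length + 1)) l i (i + 1)
      have hlen_take : (l.take i).length = i := by simp; omega
      have hH := pvH_fA (l.drop i)
      have ihx := ih (pvInnerA ((l.length + 1) * (l.length + 1)) l i (i + 1)) (i + 1)
        (by omega)
      rw [hinner] at ihx
      rw [hinner, ihx]
      cases hfa : pvFA (l.drop i) with
      | nil =>
        have hHnil : pvH (l.drop i) = [] := by rw [hH, hfa]
        rw [hHnil]
        simp only [List.append_nil]
        rw [List.take_of_length_le (by omega), List.drop_eq_nil_of_le (by omega)]
        simp [pvH]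
      | cons y u =>
        have hHcons : pvH (l.drop i) = y :: pvH u := by rw [hH, hfa]
        rw [hHcons]
        have htake : (l.take i ++ y :: u).take (i + 1) = l.take i ++ [y] := by
          rw [List.take_append, hlen_take, List.take_take,
            show min (i + 1) i = i from by omega, show i + 1 - i = 1 from by omega]
          simp
        have hdrop : (l.take i ++ y :: u).drop (i + 1) = u := by
          rw [List.drop_append, hlen_take, show i + 1 - i = 1 from by omega,
            List.drop_of_length_le (by omega)]
          simp
        rw [htake, hdrop, List.append_assoc]
        simp
    · rw [if_neg h, List.take_of_length_le (by omega), List.drop_eq_nil_of_le (by omega), pvH,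
        List.append_nil]

-- ===== VERDICT (by name: the statement is the Claim_ definition above) =====
theorem remove_repeating_elements_spec : Claim_equal_remove_repeating_elements := by
  intro l _
  unfold Spec_remove_repeating_elements
  rw [pvAlt_eq_pvH, remove_repeating_elements, pvOuterA_spec (l.length + 1) l 0 (by omega)]
  simp
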